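-- pv_equiv track=rewrite | github.com/messrobd/cs01-Final_GamerNetwork | gamer_network.py | get_secondary_connections
-- ===== SOURCE A (Python) =====
-- def get_secondary_connections(network, user):
--     if user not in network:
--         return None
--     if 'connections' not in network[user]:
--         return []
--     secondary_connections = []
--     for connection in network[user]['connections']:
--         if 'connections' in network[connection]:
--             for connection2 in network[connection]['connections']:
--                 if connection2 not in secondary_connections:
--                     secondary_connections.append(connection2)
--     return secondary_connections
-- ===== SOURCE B (Python) =====
-- def get_secondary_connections(network, user):
--     if user not in network:
--         return None
--     if 'connections' not in network[user]:
--         return []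
--
--     def collect(conns):
--         if not conns:
--             return []
--         entry = network[conns[0]]
--         head = entry['connections'] if 'connections' in entry else []
--         return list(head) + collect(conns[1:])
--
--     def dedup(xs):
--         if not xs:
--             return []
--         return [xs[0]] + dedup([y for y in xs[1:] if y != xs[0]])
--
--     return dedup(collect(network[user]['connections']))
-- ===== Notes on version B (the rewrite author's own statement) =====
-- stated objective: alternative
-- what changed: B is purely recursive with no seen-accumulator: it collects every second-level connection by structural recursion over the user's connection list, then deduplicates by recursively keeping the head and filtering its copies out of the remainder (keep-head/filter-tail), instead of A's imperative nested loops with an interleaved 'not in seen' membership test.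
import Mathlib
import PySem

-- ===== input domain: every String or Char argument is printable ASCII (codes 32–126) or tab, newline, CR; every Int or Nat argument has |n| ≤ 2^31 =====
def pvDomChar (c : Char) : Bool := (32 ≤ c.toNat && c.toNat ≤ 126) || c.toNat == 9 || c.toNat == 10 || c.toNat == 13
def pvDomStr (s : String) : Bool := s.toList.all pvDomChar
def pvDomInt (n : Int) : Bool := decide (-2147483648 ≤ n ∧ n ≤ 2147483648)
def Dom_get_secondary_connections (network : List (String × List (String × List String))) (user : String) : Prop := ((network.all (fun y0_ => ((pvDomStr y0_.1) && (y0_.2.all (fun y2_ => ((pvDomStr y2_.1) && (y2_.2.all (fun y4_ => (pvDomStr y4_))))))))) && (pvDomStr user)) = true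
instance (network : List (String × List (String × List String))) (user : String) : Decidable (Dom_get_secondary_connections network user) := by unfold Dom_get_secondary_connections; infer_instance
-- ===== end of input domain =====

-- B is purely recursive with no seen-accumulator: collect all second-level connections by
-- structural recursion, then deduplicate by keep-head/filter-tail recursion (objective: alternative).

-- ===== PORT A =====
-- inner for-loop of A: append each connection2 not yet seen
def pvAInner (seen : List String) (cs : List String) : List String :=
  cs.foldl (fun s c2 => if c2 ∈ s then s else s ++ [c2]) seen

-- one iteration of A's outer for-loop; acc = none once a KeyError (network[connection]) occurred
def pvAStep (network : List (String × List (String × List String)))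
    (acc : Option (List String)) (c : String) : Option (List String) :=
  match acc with
  | none => none
  | some seen =>
    match List.lookup c network with
    | none => none
    | some d =>
      match List.lookup "connections" d with
      | none => some seen
      | some cs => some (pvAInner seen cs)

def get_secondary_connections (network : List (String × List (String × List String))) (user : String) : Option (List String) :=
  match List.lookup user network with
  | none => none
  | some entry =>
    match List.lookup "connections" entry with
    | none => some []
    | some conns => conns.foldl (pvAStep network) (some [])

-- ===== PORT B =====
-- B's 'collect': structural recursion over conns (none = KeyError on network[c], as in B's Python)
def pvCollect (network : List (String × List (String × List String))) : List String → Option (List String)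
  | [] => some []
  | c :: rest =>
    match List.lookup c network with
    | none => none
    | some entry =>
      let head := (List.lookup "connections" entry).getD []
      (pvCollect network rest).map (fun tail => head ++ tail)

-- B's 'dedup': keep the head, filter its copies out of the remainder, recurse
def pvDedup : List String → List String
  | [] => []
  | x :: xs => x :: pvDedup (xs.filter (fun y => y ≠ x))
termination_by xs => xs.length
decreasing_by simpa using Nat.lt_succ_of_le (le_trans (List.length_filter_le _ _) (le_of_eq (List.length_attach (l := xs))))

def get_secondary_connections_alt (network : List (String × List (String × List String))) (user : String) : Option (List String) :=
  match List.lookup user network with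
  | none => none
  | some entry =>
    match List.lookup "connections" entry with
    | none => some []
    | some conns => (pvCollect network conns).map pvDedup

-- ===== PRECONDITION & SPEC =====
-- Pre_ excludes exactly the inputs on which Python A raises KeyError: a listed connection of the
-- user that is itself absent from the network (B's collect raises there too).
def pvPreB (network : List (String × List (String × List String))) (user : String) : Bool :=
  match List.lookup user network with
  | none => true
  | some entry =>
    match List.lookup "connections" entry with
    | none => true
    | some conns => conns.all (fun c => (List.lookup c network).isSome)

def Pre_get_secondary_connections (network : List (String × List (String × List String))) (user : String) : Prop :=
  pvPreB network user = true
instance (network : List (String × List (String × List String))) (user : String) : Decidable (Pre_get_secondary_connections network user) := by unfold Pre_get_secondary_connections; infer_instance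

def pvWitness_get_secondary_connections : (List (String × List (String × List String))) × String :=
  ([("a", [("connections", ["b"])]), ("b", [("connections", ["a", "c"])]), ("c", [])], "a")

def Spec_get_secondary_connections (network : List (String × List (String × List String))) (user : String) (out : Option (List String)) : Prop := out = get_secondary_connections_alt network user
instance (network : List (String × List (String × List String))) (user : String) (out : Option (List String)) : Decidable (Spec_get_secondary_connections network user out) := by unfold Spec_get_secondary_connections; infer_instance

-- ===== CLAIM (what is proved, stated in full; the proofs are below) =====
def Claim_equal_get_secondary_connections : Prop := ∀ (network : List (String × List (String × List String))) (user : String), Dom_get_secondary_connections network user → Pre_get_secondary_connections network user → Spec_get_secondary_connections network user (get_secondary_connections network user)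

-- ===== LEMMAS AND PROOFS =====
theorem pvDedup_nil : pvDedup [] = [] := by rw [pvDedup]

theorem pvDedup_cons (x : String) (xs : List String) :
    pvDedup (x :: xs) = x :: pvDedup (xs.filter (fun y => y ≠ x)) := by rw [pvDedup]

theorem pvAInner_append (seen cs tail : List String) :
    pvAInner seen (cs ++ tail) = pvAInner (pvAInner seen cs) tail := by
  simp [pvAInner, List.foldl_append]

-- A's seen-accumulator fold equals "seen ++ keep-head/filter-tail dedup of the unseen part"
theorem pvAInner_eq_dedup (cs : List String) : ∀ seen : List String,
    pvAInner seen cs = seen ++ pvDedup (cs.filter (fun y => y ∉ seen)) := by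
  induction cs with
  | nil => intro seen; simp [pvAInner, pvDedup_nil]
  | cons x xs ih =>
    intro seen
    by_cases hx : x ∈ seen
    · have : pvAInner seen (x :: xs) = pvAInner seen xs := by
        simp [pvAInner, hx]
      rw [this, ih seen]
      simp [List.filter_cons, hx]
    · have : pvAInner seen (x :: xs) = pvAInner (seen ++ [x]) xs := by
        simp [pvAInner, hx]
      rw [this, ih (seen ++ [x])]
      have hfe : xs.filter (fun y => y ∉ seen ++ [x])
          = (xs.filter (fun y => y ∉ seen)).filter (fun y => y ≠ x) := by
        rw [List.filter_filter]
        apply List.filter_congr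
        intro y _
        by_cases h1 : y = x <;> by_cases h2 : y ∈ seen <;> simp [h1, h2]
      rw [hfe]
      rw [List.filter_cons]
      simp only [hx, decide_not, decide_eq_true_eq, not_false_iff, decide_true, if_true,
        pvDedup_cons]
      simp

theorem pv_main (network : List (String × List (String × List String)))
    (conns : List String) (seen : List String)
    (h : ∀ c ∈ conns, (List.lookup c network).isSome) :
    conns.foldl (pvAStep network) (some seen)
      = (pvCollect network conns).map (fun flat => pvAInner seen flat) := by
  induction conns generalizing seen with
  | nil => simp [pvCollect, pvAInner]
  | cons c rest ih =>
    have hc : (List.lookup c network).isSome := h c (by simp)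
    obtain ⟨d, hd⟩ := Option.isSome_iff_exists.mp hc
    have hrest : ∀ x ∈ rest, (List.lookup x network).isSome := fun x hx => h x (by simp [hx])
    simp only [List.foldl_cons, pvCollect, hd, pvAStep]
    cases hcs : List.lookup "connections" d with
    | none =>
      rw [ih seen hrest]
      cases pvCollect network rest <;> simp
    | some cs =>
      rw [ih (pvAInner seen cs) hrest]
      cases pvCollect network rest with
      | none => simp
      | some tail => simp [pvAInner_append]

-- ===== VERDICT (by name: the statement is the Claim_ definition above) =====
theorem get_secondary_connections_spec : Claim_equal_get_secondary_connections := by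
  intro network user _ hpre
  unfold Spec_get_secondary_connections
  unfold Pre_get_secondary_connections pvPreB at hpre
  unfold get_secondary_connections get_secondary_connections_alt
  cases hu : List.lookup user network with
  | none => simp
  | some entry =>
    rw [hu] at hpre; simp only at hpre
    cases hc : List.lookup "connections" entry with
    | none => simp [hc]
    | some conns =>
      rw [hc] at hpre; simp only at hpre
      simp only [hc]
      have h : ∀ c ∈ conns, (List.lookup c network).isSome := by
        intro c hcmem
        exact List.all_eq_true.mp hpre c hcmem
      rw [pv_main network conns [] h]
      cases pvCollect network conns with
      | none => rfl
      | some flat => simp [pvAInner_eq_dedup]
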